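-- pv_equiv track=rewrite | github.com/danielcdl/funcoes-matematicas | numero_por_extenso.py | milhares
-- ===== SOURCE A (Python) =====
-- UNIDADES = ('zero', 'um', 'dois', 'três', 'quatro', 'cinco', 'seis', 'sete', 'oito', 'nove')
--
-- DEZENA_ESPECIAL = ('', 'onze', 'doze', 'treze', 'quatorze', 'quinze', 'dezesseis', 'dezessete', 'dezoito', 'dezenove')
--
-- DEZENAS = ('', 'dez', 'vinte', 'trinta', 'quarenta', 'cincoenta', 'sessenta', 'setenta', 'oitenta', 'noventa')
--
-- CENTENAS = ('cem', 'cento', 'duzentos', 'trezentos', 'quatrocentos', 'quinhentos', 'seiscentos', 'setecentos','oitocentos', 'novecentos')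
--
-- MILHAR = (('milhão', 'milhões'), ('bilhão', 'bilhões'), ('trilhão', 'trilhões'), ('quatrilhão', 'quatrilhões'), ('quintilhão', 'quintilhões'),
--     ('sextilhão', 'sextilhões'), ('septilhão', 'septilhões'), ('octilhão', 'octilhões'), ('nonilhão', 'nonilhões'), ('decilhão', 'decilhões'),
--     ('unodecilhão', 'unodecilhões'), ('duodecilhão', 'duodecilhões'), ('tredecilhão', 'tredecilhões'), ('quatuordecilhão', 'quatuordecilhões'),
--     ('quindecilhão', 'quindecilhões'), ('sexdecilhão', 'sexdecilhões'), ('sepdecilhão', 'sepdecilhões'), ('octodecilhão', 'octodecilhões'),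
--     ('novemdecilhão', 'novemdecilhões')
-- )
--
-- def unidade_dezena_centena(terno):
--     numero_extenso = ''
--     termos = len(terno)
--     digito = terno[0]
--     if termos == 3:
--         if digito != 0:
--             if terno[1:] == [0, 0]:
--                 if digito == 1:
--                     numero_extenso += CENTENAS[0]
--                 else:
--                     numero_extenso += CENTENAS[digito]
--             else:
--                 numero_extenso += CENTENAS[digito] + ' e '
--                 numero_extenso += unidade_dezena_centena(terno[1:])
--         else:
--             numero_extenso += unidade_dezena_centena(terno[1:])
--     if termos == 2:
--         if digito != 0:
--                 if terno[1] == 0: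
--                     numero_extenso += DEZENAS[digito]
--                 elif digito == 1:
--                     numero_extenso += DEZENA_ESPECIAL[terno[1]]
--                 else:
--                     numero_extenso += DEZENAS[digito] + ' e ' + unidade_dezena_centena(terno[1:])
--         else:
--             numero_extenso += unidade_dezena_centena(terno[1:])
--     elif termos == 1:
--         numero_extenso += UNIDADES[digito]
--
--     return numero_extenso
--
-- def milhares(ternos):
--     numero_extenso = ''
--     termos = len(ternos)
--     terno = ternos[0]
--
--     if termos >= 3:
--         if terno != [0, 0, 0]:
--             if terno == [0, 0, 1] or terno == [1]:
--                 numero_extenso += 'um ' + MILHAR[termos - 3][0]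
--             else:
--                 numero_extenso += unidade_dezena_centena(terno) + ' ' + MILHAR[termos - 3][1]
--
--             if ternos[1:] == [[0, 0, 0],[0, 0, 0]]:
--                 return numero_extenso
--             else:
--                 numero_extenso += ' ' + milhares(ternos[1:])
--         else:
--             numero_extenso += milhares(ternos[1:])
--
--     if termos == 2:
--         if terno != [0, 0, 0]:
--             numero_extenso += unidade_dezena_centena(terno) + ' mil'
--             if ternos[1] == [0, 0, 0]:
--                 return numero_extenso
--             elif ternos[1][0]:
--                 numero_extenso += ' ' + milhares(ternos[1:])
--             else:
--                 numero_extenso += ' e ' + milhares(ternos[1:])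
--         else:
--             numero_extenso += ' ' + milhares(ternos[1:])
--
--     elif termos == 1:
--         if terno != [0, 0, 0]:
--             numero_extenso += unidade_dezena_centena(terno)
--
--     return numero_extenso
-- ===== SOURCE B (Python) =====
-- UNIDADES = ('zero', 'um', 'dois', 'três', 'quatro', 'cinco', 'seis', 'sete', 'oito', 'nove')
--
-- DEZENA_ESPECIAL = ('', 'onze', 'doze', 'treze', 'quatorze', 'quinze', 'dezesseis', 'dezessete', 'dezoito', 'dezenove')
--
-- DEZENAS = ('', 'dez', 'vinte', 'trinta', 'quarenta', 'cincoenta', 'sessenta', 'setenta', 'oitenta', 'noventa')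
--
-- CENTENAS = ('cem', 'cento', 'duzentos', 'trezentos', 'quatrocentos', 'quinhentos', 'seiscentos', 'setecentos','oitocentos', 'novecentos')
--
-- MILHAR = (('milhão', 'milhões'), ('bilhão', 'bilhões'), ('trilhão', 'trilhões'), ('quatrilhão', 'quatrilhões'), ('quintilhão', 'quintilhões'),
--     ('sextilhão', 'sextilhões'), ('septilhão', 'septilhões'), ('octilhão', 'octilhões'), ('nonilhão', 'nonilhões'), ('decilhão', 'decilhões'),
--     ('unodecilhão', 'unodecilhões'), ('duodecilhão', 'duodecilhões'), ('tredecilhão', 'tredecilhões'), ('quatuordecilhão', 'quatuordecilhões'),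
--     ('quindecilhão', 'quindecilhões'), ('sexdecilhão', 'sexdecilhões'), ('sepdecilhão', 'sepdecilhões'), ('octodecilhão', 'octodecilhões'),
--     ('novemdecilhão', 'novemdecilhões')
-- )
--
-- def dezena(d, u):
--     # tens-and-units words, non-recursively
--     if d == 1 and u != 0:
--         return DEZENA_ESPECIAL[u]
--     if d != 0 and u != 0:
--         return DEZENAS[d] + ' e ' + UNIDADES[u]
--     if d != 0:
--         return DEZENAS[d]
--     return UNIDADES[u]
--
-- def grupo(terno):
--     # non-recursive formatting of one digit group, dispatched on its length
--     if len(terno) == 1: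
--         return UNIDADES[terno[0]]
--     if len(terno) == 2:
--         return dezena(terno[0], terno[1])
--     if len(terno) == 3:
--         c, d, u = terno
--         if c == 0:
--             return dezena(d, u)
--         if d == 0 and u == 0:
--             return 'cem' if c == 1 else CENTENAS[c]
--         return CENTENAS[c] + ' e ' + dezena(d, u)
--     return ''
--
-- def milhares(ternos):
--     out = ''
--     n = len(ternos)
--     for i, terno in enumerate(ternos):
--         k = n - i  # groups remaining, current one included
--         if k >= 3:
--             if terno != [0, 0, 0]:
--                 if terno == [0, 0, 1] or terno == [1]:
--                     out += 'um ' + MILHAR[k - 3][0]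
--                 else:
--                     out += grupo(terno) + ' ' + MILHAR[k - 3][1]
--                 if ternos[i + 1:] == [[0, 0, 0], [0, 0, 0]]:
--                     return out
--                 out += ' '
--         elif k == 2:
--             if terno != [0, 0, 0]:
--                 out += grupo(terno) + ' mil'
--                 if ternos[i + 1] == [0, 0, 0]:
--                     return out
--                 out += ' ' if ternos[i + 1][0] else ' e '
--             else:
--                 out += ' '
--         else:
--             if terno != [0, 0, 0]:
--                 out += grupo(terno)
--     return out
-- ===== Notes on version B (the rewrite author's own statement) =====
-- stated objective: alternative
-- what changed: Recursive descent over suffixes with a recursive per-group formatter is replaced by a single explicit loop over the list with an accumulator string, and the group formatter is rewritten as non-recursive direct case analysis on the digits (length dispatch plus a tens-and-units helper).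
import Mathlib
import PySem

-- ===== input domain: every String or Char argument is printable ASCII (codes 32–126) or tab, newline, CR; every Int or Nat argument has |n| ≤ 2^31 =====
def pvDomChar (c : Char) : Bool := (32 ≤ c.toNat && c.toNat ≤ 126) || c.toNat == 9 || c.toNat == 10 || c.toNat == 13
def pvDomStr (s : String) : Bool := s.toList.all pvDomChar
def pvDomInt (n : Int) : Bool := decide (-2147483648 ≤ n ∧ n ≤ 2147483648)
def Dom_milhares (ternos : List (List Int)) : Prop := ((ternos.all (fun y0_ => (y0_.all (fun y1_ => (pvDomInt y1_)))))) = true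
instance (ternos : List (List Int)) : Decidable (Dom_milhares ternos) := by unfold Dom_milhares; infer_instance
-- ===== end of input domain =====

-- B replaces A's recursive descent (with a recursive group formatter) by one explicit
-- accumulator loop over the groups and a non-recursive digit case analysis (objective: alternative).

-- ===== PORT A =====
-- shared module constants (same tuples in both Python files)
def UNIDADES : List String := ["zero", "um", "dois", "três", "quatro", "cinco", "seis", "sete", "oito", "nove"]
def DEZENA_ESPECIAL : List String := ["", "onze", "doze", "treze", "quatorze", "quinze", "dezesseis", "dezessete", "dezoito", "dezenove"]
def DEZENAS : List String := ["", "dez", "vinte", "trinta", "quarenta", "cincoenta", "sessenta", "setenta", "oitenta", "noventa"]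
def CENTENAS : List String := ["cem", "cento", "duzentos", "trezentos", "quatrocentos", "quinhentos", "seiscentos", "setecentos", "oitocentos", "novecentos"]
def MILHAR : List (String × String) :=
  [("milhão", "milhões"), ("bilhão", "bilhões"), ("trilhão", "trilhões"), ("quatrilhão", "quatrilhões"),
   ("quintilhão", "quintilhões"), ("sextilhão", "sextilhões"), ("septilhão", "septilhões"), ("octilhão", "octilhões"),
   ("nonilhão", "nonilhões"), ("decilhão", "decilhões"), ("unodecilhão", "unodecilhões"), ("duodecilhão", "duodecilhões"),
   ("tredecilhão", "tredecilhões"), ("quatuordecilhão", "quatuordecilhões"), ("quindecilhão", "quindecilhões"),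
   ("sexdecilhão", "sexdecilhões"), ("sepdecilhão", "sepdecilhões"), ("octodecilhão", "octodecilhões"),
   ("novemdecilhão", "novemdecilhões")]

-- TUPLE[i] (Python raises on out-of-range; Pre_ keeps indices in range, getD is the `none` default)
def tab (xs : List String) (i : Int) : String := (PySem.List.pyGet? xs i).getD ""
def milharAt (i : Int) : String × String := (PySem.List.pyGet? MILHAR i).getD ("", "")

-- unidade_dezena_centena, step for step (terno[0] of [] raises in Python: unreachable under Pre_)
def udc : List Int → String
  | [] => ""
  | d :: rest =>
    let termos := rest.length + 1
    if termos = 3 then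
      if d ≠ 0 then
        if rest = [0, 0] then
          if d = 1 then tab CENTENAS 0 else tab CENTENAS d
        else tab CENTENAS d ++ " e " ++ udc rest
      else udc rest
    else if termos = 2 then
      if d ≠ 0 then
        let u := (PySem.List.pyGet? rest 0).getD 0   -- terno[1]
        if u = 0 then tab DEZENAS d
        else if d = 1 then tab DEZENA_ESPECIAL u
        else tab DEZENAS d ++ " e " ++ udc rest
      else udc rest
    else if termos = 1 then tab UNIDADES d
    else ""

def milhares : List (List Int) → String
  | [] => ""   -- ternos[0] raises in Python; unreachable under Pre_
  | terno :: rest =>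
    let termos := rest.length + 1
    if termos ≥ 3 then
      if terno ≠ [0, 0, 0] then
        let chunk :=
          if terno = [0, 0, 1] ∨ terno = [1] then "um " ++ (milharAt ((termos : Int) - 3)).1
          else udc terno ++ " " ++ (milharAt ((termos : Int) - 3)).2
        if rest = [[0, 0, 0], [0, 0, 0]] then chunk
        else chunk ++ " " ++ milhares rest
      else milhares rest
    else if termos = 2 then
      if terno ≠ [0, 0, 0] then
        let s := udc terno ++ " mil"
        let t1 := (PySem.List.pyGet? rest 0).getD []        -- ternos[1]
        if t1 = [0, 0, 0] then s
        else if (PySem.List.pyGet? t1 0).getD 0 ≠ 0 then s ++ " " ++ milhares rest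
        else s ++ " e " ++ milhares rest
      else " " ++ milhares rest
    else if termos = 1 then
      if terno ≠ [0, 0, 0] then udc terno else ""
    else ""

-- ===== PORT B =====
-- Source B's dezena: tens-and-units words, non-recursively
def dezena (d u : Int) : String :=
  if d = 1 ∧ u ≠ 0 then tab DEZENA_ESPECIAL u
  else if d ≠ 0 ∧ u ≠ 0 then tab DEZENAS d ++ " e " ++ tab UNIDADES u
  else if d ≠ 0 then tab DEZENAS d
  else tab UNIDADES u

-- Source B's grupo: one digit group, dispatched non-recursively on its length ('' for other shapes)
def grupo : List Int → String
  | [x] => tab UNIDADES x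
  | [d, u] => dezena d u
  | [c, d, u] =>
    if c = 0 then dezena d u
    else if d = 0 ∧ u = 0 then (if c = 1 then "cem" else tab CENTENAS c)
    else tab CENTENAS c ++ " e " ++ dezena d u
  | _ => ""

-- Source B's for-loop with early returns, as a tail recursion over the remaining suffix (k = len - i)
def goB (acc : String) : List (List Int) → String
  | [] => acc
  | terno :: rest =>
    let k := rest.length + 1
    if k ≥ 3 then
      if terno ≠ [0, 0, 0] then
        let acc' := acc ++
          (if terno = [0, 0, 1] ∨ terno = [1] then "um " ++ (milharAt ((k : Int) - 3)).1
           else grupo terno ++ " " ++ (milharAt ((k : Int) - 3)).2)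
        if rest = [[0, 0, 0], [0, 0, 0]] then acc'
        else goB (acc' ++ " ") rest
      else goB acc rest
    else if k = 2 then
      if terno ≠ [0, 0, 0] then
        let acc' := acc ++ (grupo terno ++ " mil")
        let t1 := (PySem.List.pyGet? rest 0).getD []        -- ternos[i+1]
        if t1 = [0, 0, 0] then acc'
        else goB (acc' ++ (if (PySem.List.pyGet? t1 0).getD 0 ≠ 0 then " " else " e ")) rest
      else goB (acc ++ " ") rest
    else goB (acc ++ (if terno ≠ [0, 0, 0] then grupo terno else "")) rest

def milhares_alt (ternos : List (List Int)) : String := goB "" ternos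

-- ===== PRECONDITION & SPEC =====
-- Pre_ is where A returns normally: a nonempty list of nonempty groups, groups of length
-- ≤ 3 with digits in -10..9 (Python's tuple indexing also accepts the negatives), and every
-- group beyond the largest scale word (22 or more groups remaining) equal to [0,0,0];
-- outside it A raises IndexError (empty list/group, a digit looked up out of range, or a
-- nonzero group past MILHAR's last scale word).
def Pre_milhares (ternos : List (List Int)) : Prop :=
  ternos ≠ [] ∧
  (∀ t ∈ ternos, t ≠ [] ∧ (t.length ≤ 3 → ∀ d ∈ t, -10 ≤ d ∧ d < 10)) ∧
  (∀ t ∈ ternos.take (ternos.length - 21), t = [0, 0, 0])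
instance (ternos : List (List Int)) : Decidable (Pre_milhares ternos) := by
  unfold Pre_milhares; infer_instance

def pvWitness_milhares : List (List Int) := [[1, 2, 3], [0, 0, 0], [4, 0, 5]]

def Spec_milhares (ternos : List (List Int)) (out : String) : Prop := out = milhares_alt ternos
instance (ternos : List (List Int)) (out : String) : Decidable (Spec_milhares ternos out) := by
  unfold Spec_milhares; infer_instance

-- ===== CLAIM (what is proved, stated in full; the proofs are below) =====
def Claim_equal_milhares : Prop :=
  ∀ (ternos : List (List Int)), Dom_milhares ternos → Pre_milhares ternos →
    Spec_milhares ternos (milhares ternos)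

-- ===== LEMMAS AND PROOFS =====

-- the two group formatters agree on every group
lemma udc_eq_grupo : ∀ t : List Int, udc t = grupo t
  | [] => rfl
  | [x] => by simp [udc, grupo]
  | [d, u] => by
    simp only [udc, grupo, dezena, List.length, PySem.List.pyGet?, PySem.List.pyIdx?]
    norm_num
    split_ifs <;> first | rfl | simp_all
  | [c, d, u] => by
    simp only [udc, grupo, dezena, List.length, PySem.List.pyGet?, PySem.List.pyIdx?]
    norm_num
    split_ifs <;> first | rfl | simp_all
  | _ :: _ :: _ :: _ :: _ => by simp [udc, grupo]

-- loop invariant: running the loop from `acc` appends exactly A's recursive result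
lemma goB_eq (ternos : List (List Int)) (acc : String) :
    goB acc ternos = acc ++ milhares ternos := by
  induction ternos generalizing acc with
  | nil => simp [goB, milhares]
  | cons terno rest ih =>
    have hg := udc_eq_grupo terno
    simp only [goB, milhares]
    split_ifs <;>
      first
        | (simp_all [goB, milhares, String.append_assoc, String.append_empty,
             List.length_eq_zero_iff]; done)
        | (cases rest <;> simp_all)

theorem milhares_spec_aux (ternos : List (List Int)) :
    milhares ternos = milhares_alt ternos := by
  rw [milhares_alt, goB_eq ternos, String.empty_append]

-- ===== VERDICT (by name: the statement is the Claim_ definition above) =====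
theorem milhares_spec : Claim_equal_milhares := by
  intro ternos _ _
  unfold Spec_milhares
  exact milhares_spec_aux ternos
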